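-- pv_equiv track=rewrite | github.com/cday-with-ai/ChessBoardToFEN | dataset/add_position.py | validate_fen
-- ===== SOURCE A (Python) =====
-- def validate_fen(fen):
--     """Basic FEN validation"""
--     parts = fen.split()
--     if len(parts) < 1:
--         return False
--
--     # Check board part
--     rows = parts[0].split('/')
--     if len(rows) != 8:
--         return False
--
--     # Check each row has 8 squares
--     for row in rows:
--         count = 0
--         for char in row:
--             if char.isdigit():
--                 count += int(char)
--             elif char in 'kqrbnpKQRBNP':
--                 count += 1
--             else:
--                 return False
--         if count != 8:
--             return False
--
--     return True
-- ===== SOURCE B (Python) =====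
-- def validate_fen(fen):
--     """Basic FEN validation (single pass over the board field, no split('/'))"""
--     parts = fen.split()
--     if not parts:
--         return False
--     slashes = 0
--     count = 0
--     for ch in parts[0]:
--         if ch == '/':
--             if count != 8:
--                 return False
--             slashes += 1
--             count = 0
--         elif ch.isdigit():
--             count += int(ch)
--         elif ch in 'kqrbnpKQRBNP':
--             count += 1
--         else:
--             return False
--     return slashes == 7 and count == 8
-- ===== Notes on version B (the rewrite author's own statement) =====
-- stated objective: alternative
-- what changed: Instead of splitting the board field on slashes into a row list and running a nested per-row loop after an up-front row-count check, B makes one pass over the board field with a slash counter and a running square count, verifying each row at its terminating slash and requiring exactly seven slashes at the end.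
import Mathlib
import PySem

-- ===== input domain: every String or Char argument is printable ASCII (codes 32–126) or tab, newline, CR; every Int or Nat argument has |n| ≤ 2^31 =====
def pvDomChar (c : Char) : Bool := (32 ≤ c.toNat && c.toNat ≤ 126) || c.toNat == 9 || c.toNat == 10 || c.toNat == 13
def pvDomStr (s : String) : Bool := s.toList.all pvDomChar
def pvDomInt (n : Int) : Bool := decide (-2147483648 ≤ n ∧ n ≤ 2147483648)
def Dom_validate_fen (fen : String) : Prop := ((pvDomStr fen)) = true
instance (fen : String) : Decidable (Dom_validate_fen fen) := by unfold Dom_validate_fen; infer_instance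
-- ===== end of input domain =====

-- B replaces A's split-on-'/'-then-nested-row-loop by a single pass over the board field
-- keeping a slash counter and a running square count (alternative decomposition, same cost).

-- ===== PORT A =====
-- inner 'for char in row' loop: some count, or none = the 'return False' on an invalid char
def pieceChars : List Char := "kqrbnpKQRBNP".toList

-- int(char): exact on Dom — isdigit admits exactly ASCII '0'..'9' there, where ofChars? is some; getD 0 is never used
def rowLoopA : List Char → Int → Option Int
  | [], count => some count
  | c :: rest, count =>
    if PySem.Chars.isdigit c then rowLoopA rest (count + (PySem.Int.ofChars? [c]).getD 0)
    else if PySem.Chars.isIn [c] pieceChars then rowLoopA rest (count + 1)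
    else none

-- outer 'for row in rows' loop
def rowsLoopA : List (List Char) → Bool
  | [] => true
  | r :: rest =>
    match rowLoopA r 0 with
    | none => false
    | some count => if count ≠ 8 then false else rowsLoopA rest

def validate_fen (fen : String) : Bool :=
  match PySem.Str.split₀ fen with
  | [] => false
  | p :: _ =>
    let rows := PySem.Chars.splitOn p.toList ['/']
    if rows.length ≠ 8 then false else rowsLoopA rows

-- ===== PORT B =====
-- the single 'for ch in parts[0]' loop of Source B, state = (slashes, count); [] is the 'return slashes == 7 and count == 8'
def bLoop : List Char → Int → Int → Bool
  | [], slashes, count => slashes == 7 && count == 8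
  | c :: rest, slashes, count =>
    if c = '/' then (if count ≠ 8 then false else bLoop rest (slashes + 1) 0)
    else if PySem.Chars.isdigit c then bLoop rest slashes (count + (PySem.Int.ofChars? [c]).getD 0)
    else if PySem.Chars.isIn [c] pieceChars then bLoop rest slashes (count + 1)
    else false

def validate_fen_alt (fen : String) : Bool :=
  match PySem.Str.split₀ fen with
  | [] => false
  | p :: _ => bLoop p.toList 0 0

-- ===== PRECONDITION & SPEC =====
def Spec_validate_fen (fen : String) (out : Bool) : Prop := out = validate_fen_alt fen
instance (fen : String) (out : Bool) : Decidable (Spec_validate_fen fen out) := by unfold Spec_validate_fen; infer_instance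

-- ===== CLAIM (what is proved, stated in full; the proofs are below) =====
def Claim_equal_validate_fen : Prop := ∀ (fen : String), Dom_validate_fen fen → Spec_validate_fen fen (validate_fen fen)

-- ===== LEMMAS AND PROOFS =====

-- a direct structural description of split on '/'
def splitSeg : List Char → List (List Char)
  | [] => [[]]
  | c :: rest =>
    if c = '/' then [] :: splitSeg rest
    else
      match splitSeg rest with
      | [] => [[c]]
      | h :: t => (c :: h) :: t

theorem splitSeg_ne_nil (cs : List Char) : splitSeg cs ≠ [] := by
  cases cs with
  | nil => simp [splitSeg]
  | cons c rest =>
    simp only [splitSeg]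
    split
    · simp
    · cases h : splitSeg rest <;> simp

-- prepend a prefix onto the first segment
def consHead (pre : List Char) : List (List Char) → List (List Char)
  | [] => [pre]
  | h :: t => (pre ++ h) :: t

theorem splitOn_go_spec (fuel : Nat) (l cur : List Char) (acc : List (List Char))
    (h : l.length < fuel) :
    PySem.Chars.splitOn.go ['/'] fuel l cur acc = acc.reverse ++ consHead cur.reverse (splitSeg l) := by
  induction fuel generalizing l cur acc with
  | zero => omega
  | succ f ih =>
    cases l with
    | nil =>
      simp [PySem.Chars.splitOn.go, splitSeg, consHead]
    | cons c rest =>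
      simp only [PySem.Chars.splitOn.go]
      by_cases hc : c = '/'
      · subst hc
        have hp : List.isPrefixOf ['/'] ('/' :: rest) = true := by simp [List.isPrefixOf]
        simp only [hp, if_true, List.length_cons, List.length_nil, List.drop_succ_cons, List.drop_zero]
        rw [ih rest [] (cur.reverse :: acc) (by simpa using Nat.lt_of_succ_lt_succ h)]
        simp only [splitSeg, if_pos rfl, consHead, List.reverse_cons, List.append_assoc,
          List.singleton_append, List.append_nil]
        cases hs : splitSeg rest with
        | nil => exact absurd hs (splitSeg_ne_nil rest)
        | cons a t => simp [consHead]
      · have hp : List.isPrefixOf ['/'] (c :: rest) = false := by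
          simp [List.isPrefixOf, BEq.beq]
          intro hh; exact absurd hh.symm hc
        simp only [hp, if_false]
        rw [ih rest (c :: cur) acc (by simpa using Nat.lt_of_succ_lt_succ h)]
        simp only [splitSeg, hc, if_false, List.reverse_cons]
        cases hs : splitSeg rest with
        | nil => exact absurd hs (splitSeg_ne_nil rest)
        | cons hseg t => simp [consHead]

theorem splitOn_eq_splitSeg (cs : List Char) :
    PySem.Chars.splitOn cs ['/'] = splitSeg cs := by
  rw [PySem.Chars.splitOn, splitOn_go_spec cs.length.succ cs [] [] (Nat.lt_succ_self _)]
  cases hs : splitSeg cs with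
  | nil => exact absurd hs (splitSeg_ne_nil cs)
  | cons h t => simp [consHead]

-- A's outer loop with the first row's count generalised (later rows restart at 0)
def chk : List (List Char) → Int → Bool
  | [], _ => true
  | r :: rest, count =>
    match rowLoopA r count with
    | none => false
    | some k => if k ≠ 8 then false else chk rest 0

theorem rowsLoopA_eq_chk (rows : List (List Char)) : rowsLoopA rows = chk rows 0 := by
  induction rows with
  | nil => rfl
  | cons r rest ih =>
    simp only [rowsLoopA, chk]
    cases rowLoopA r 0 with
    | none => rfl
    | some k => split <;> simp [ih]

theorem bLoop_spec (cs : List Char) (slashes count : Int) :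
    bLoop cs slashes count =
      (if slashes + ((splitSeg cs).length : Int) = 8 then chk (splitSeg cs) count else false) := by
  induction cs generalizing slashes count with
  | nil =>
    have h1 : splitSeg ([] : List Char) = [[]] := rfl
    rw [h1]
    have hch : chk [[]] count = (count == 8) := by
      by_cases h8 : count = 8 <;> simp [chk, rowLoopA, h8]
    rw [hch]
    have hl : (([[]] : List (List Char)).length : Int) = 1 := by simp
    rw [hl]
    by_cases h7 : slashes = 7
    · subst h7; norm_num [bLoop]
    · have hne : ¬ (slashes + 1 = 8) := by omega
      simp [bLoop, hne, h7]
  | cons c rest ih =>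
    simp only [bLoop]
    by_cases hc : c = '/'
    · subst hc
      have hsp : splitSeg ('/' :: rest) = [] :: splitSeg rest := by simp [splitSeg]
      rw [if_pos rfl, hsp]
      have hch : ∀ cnt : Int, chk ([] :: splitSeg rest) cnt =
          (if cnt ≠ 8 then false else chk (splitSeg rest) 0) := by
        intro cnt; simp [chk, rowLoopA]
      rw [hch]
      have hl : ((([] :: splitSeg rest) : List (List Char)).length : Int) =
          ((splitSeg rest).length : Int) + 1 := by push_cast [List.length_cons]; ring
      rw [hl]
      by_cases h8 : count = 8
      · subst h8
        have h88 : ¬ ((8 : Int) ≠ 8) := by simp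
        rw [if_neg h88, if_neg h88, ih]
        by_cases hcond : slashes + 1 + ((splitSeg rest).length : Int) = 8
        · rw [if_pos hcond, if_pos (by omega)]
        · rw [if_neg hcond, if_neg (by omega)]
      · rw [if_pos h8, if_pos h8]
        split <;> rfl
    · have hsplit : splitSeg (c :: rest) =
          (c :: (splitSeg rest).headI) :: (splitSeg rest).tail := by
        simp only [splitSeg]
        rw [if_neg hc]
        cases hs : splitSeg rest with
        | nil => exact absurd hs (splitSeg_ne_nil rest)
        | cons h t => simp
      have hlen : ((splitSeg (c :: rest)).length : Int) = ((splitSeg rest).length : Int) := by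
        rw [hsplit]
        cases hs : splitSeg rest with
        | nil => exact absurd hs (splitSeg_ne_nil rest)
        | cons h t => simp
      have hchk : ∀ cnt : Int, chk (splitSeg (c :: rest)) cnt =
          (if PySem.Chars.isdigit c then
            chk (splitSeg rest) (cnt + (PySem.Int.ofChars? [c]).getD 0)
          else if PySem.Chars.isIn [c] pieceChars then
            chk (splitSeg rest) (cnt + 1)
          else false) := by
        intro cnt
        rw [hsplit]
        cases hs : splitSeg rest with
        | nil => exact absurd hs (splitSeg_ne_nil rest)
        | cons h t =>
          by_cases hd : PySem.Chars.isdigit c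
          · simp [chk, rowLoopA, hd]
          · by_cases hk : PySem.Chars.isIn [c] pieceChars
            · simp [chk, rowLoopA, hd, hk]
            · simp [chk, rowLoopA, hd, hk]
      by_cases hd : PySem.Chars.isdigit c
      · rw [if_neg hc, if_pos hd, ih, hlen, hchk count, if_pos hd]
      · by_cases hk : PySem.Chars.isIn [c] pieceChars
        · rw [if_neg hc, if_neg hd, if_pos hk, ih, hlen, hchk count, if_neg hd, if_pos hk]
        · rw [if_neg hc, if_neg hd, if_neg hk, hchk count, if_neg hd, if_neg hk]
          split <;> rfl

-- ===== VERDICT (by name: the statement is the Claim_ definition above) =====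
theorem validate_fen_spec : Claim_equal_validate_fen := by
  intro fen _hdom
  unfold Spec_validate_fen validate_fen validate_fen_alt
  cases hsp : PySem.Str.split₀ fen with
  | nil => rfl
  | cons p rest =>
    simp only
    rw [splitOn_eq_splitSeg, bLoop_spec, rowsLoopA_eq_chk]
    by_cases hlen : (splitSeg p.toList).length = 8
    · rw [if_neg (by simp [hlen]), if_pos (by simp [hlen])]
    · rw [if_pos (by simp [hlen]), if_neg (by push_cast; omega)]
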